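-- pv_equiv track=rewrite | github.com/ben0bi/ThereWillBeLED_Python | BeLEDLib.py | createScreenMask
-- ===== SOURCE A (Python) =====
-- SCREEN_COUNT_X 		= 10	# Number of LEDs in one line on the screen.
--
-- SCREEN_COUNT_Y		= 10	# Number of lines on the screen.
--
-- SCREEN_DIRECTION 	= 2     # 0 = normal, 1 = y flip, 2 = x flip, 3 = x & y flip
--
-- def createScreenMask(screenarray,x,y):
-- 	"""Create a mask (buffer) in screen size and put the screen array on it, moved by x and y"""
--
-- 	# create the screen buffer and clear it.
-- 	returnarray = []
-- 	for cy in range(SCREEN_COUNT_Y):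
-- 		returnarray.append([])
-- 		for cx in range(SCREEN_COUNT_X):
-- 			returnarray[cy].append(0)
--
-- 	# go through the screen pixels
-- 	# and create the mask on the returnarray.
-- 	for sy in range(SCREEN_COUNT_Y):
-- 		for sx in range(SCREEN_COUNT_X):
-- 			# pixelpos is the real screen position
-- 			if SCREEN_DIRECTION==0:
-- 				ppX =sx
-- 				ppY =sy
-- 			# flip only y
-- 			if SCREEN_DIRECTION==1:
-- 				ppX = sx
-- 				ppY = SCREEN_COUNT_Y-sy-1
-- 			# flip only x
-- 			if SCREEN_DIRECTION==2:
-- 				ppX = SCREEN_COUNT_X-sx-1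
-- 				ppY = sy
-- 			# flip x and y
-- 			if SCREEN_DIRECTION==3:
-- 				ppX = SCREEN_COUNT_X-sx-1
-- 				ppY = SCREEN_COUNT_Y-sy-1
-- 			# check if the position is on the screen.
-- 			if ppX>=0 and ppY>=0 and ppX<SCREEN_COUNT_X and ppY<SCREEN_COUNT_Y:
-- 				# get the position on the screenarray
-- 				tx = sx - x
-- 				ty = sy - y
-- 				setpix = -1
-- 				if len(screenarray)>ty and ty>=0:
-- 					if len(screenarray[ty])>tx and tx>=0:
-- 						setpix = screenarray[ty][tx]
-- 				# set the pixel.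
-- 				if setpix != -1:
-- 					returnarray[ppY][ppX]=setpix
-- 	# return the result.
-- 	return returnarray
-- ===== SOURCE B (Python) =====
-- SCREEN_COUNT_X = 10
-- SCREEN_COUNT_Y = 10
-- SCREEN_DIRECTION = 2
--
-- def _shift(items, off, n, pad):
--     """Shift a sequence by off inside a window of n slots, padding with pad:
--     out[i] = items[i - off] when that index exists, else pad."""
--     lead = max(0, off)
--     start = max(0, -off)
--     body = items[start:start + max(0, n - lead)]
--     return ([pad] * min(lead, n) + body + [pad] * n)[:n]
--
-- def createScreenMask(screenarray, x, y):
--     """Whole-row pad-and-slice shifting in both axes (SCREEN_DIRECTION==2: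
--     each shifted row is reversed), instead of a scatter over a zeroed buffer."""
--     rows = [_shift([0 if v == -1 else v for v in row], x, SCREEN_COUNT_X, 0)[::-1]
--             for row in screenarray]
--     return _shift(rows, y, SCREEN_COUNT_Y, [0] * SCREEN_COUNT_X)
-- ===== Notes on version B (the rewrite author's own statement) =====
-- stated objective: alternative
-- what changed: Replaces the per-pixel scatter over a pre-zeroed 10x10 buffer by whole-row operations: each source row is value-mapped, shifted horizontally by pad-and-slice and reversed, then the list of rows is shifted vertically by the same pad-and-slice helper; no per-cell double loop or in-place writes remain.
import Mathlib
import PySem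

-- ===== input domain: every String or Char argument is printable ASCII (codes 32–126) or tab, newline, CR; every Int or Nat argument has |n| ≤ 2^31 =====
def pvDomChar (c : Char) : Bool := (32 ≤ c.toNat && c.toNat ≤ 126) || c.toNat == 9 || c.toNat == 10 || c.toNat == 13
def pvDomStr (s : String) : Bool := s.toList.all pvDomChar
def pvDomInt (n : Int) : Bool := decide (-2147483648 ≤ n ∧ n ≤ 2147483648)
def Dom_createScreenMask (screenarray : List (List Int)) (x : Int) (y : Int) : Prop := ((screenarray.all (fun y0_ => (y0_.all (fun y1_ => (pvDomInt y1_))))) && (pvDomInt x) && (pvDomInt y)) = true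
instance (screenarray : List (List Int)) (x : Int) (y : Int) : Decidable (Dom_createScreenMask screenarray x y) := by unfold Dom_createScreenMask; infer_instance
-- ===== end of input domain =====

-- B replaces A's per-pixel scatter over a pre-zeroed buffer by whole-row pad-and-slice shifts (horizontal shift + reverse per row, then a vertical shift of the row list); same return value (objective: alternative).


-- ===== PORT A =====
-- returnarray[ppY][ppX] = v  (A only executes this with both indices checked in range, so .toNat/set are exact)
def pvSet2 (buf : List (List Int)) (r c : Nat) (v : Int) : List (List Int) :=
  buf.set r ((buf.getD r []).set c v)

-- body of A's inner loop (SCREEN_DIRECTION == 2, so only that branch assigns ppX/ppY; the accesses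
-- screenarray[ty][tx] are guarded by exactly the bounds A checks, so getD with .toNat is exact here)
def pvInnerStep (sa : List (List Int)) (x y sy : Int) (buf : List (List Int)) (sx : Int) : List (List Int) :=
  let ppX : Int := 10 - sx - 1
  let ppY : Int := sy
  if ppX ≥ 0 ∧ ppY ≥ 0 ∧ ppX < 10 ∧ ppY < 10 then
    let tx := sx - x
    let ty := sy - y
    let setpix : Int :=
      if (sa.length : Int) > ty ∧ ty ≥ 0 then
        (if ((sa.getD ty.toNat []).length : Int) > tx ∧ tx ≥ 0 then (sa.getD ty.toNat []).getD tx.toNat 0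
         else -1)
      else -1
    if setpix ≠ -1 then pvSet2 buf ppY.toNat ppX.toNat setpix else buf
  else buf

def createScreenMask (screenarray : List (List Int)) (x : Int) (y : Int) : List (List Int) :=
  -- create the screen buffer and clear it
  let returnarray : List (List Int) :=
    (PySem.List.pyRange 0 10 1).foldl
      (fun r _ => r ++ [(PySem.List.pyRange 0 10 1).foldl (fun row _ => row ++ [(0 : Int)]) []]) []
  -- go through the screen pixels and create the mask on the returnarray
  (PySem.List.pyRange 0 10 1).foldl
    (fun buf sy => (PySem.List.pyRange 0 10 1).foldl (pvInnerStep screenarray x y sy) buf)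
    returnarray

-- ===== PORT B =====
-- _shift(items, off, n, pad) of Source B: both slice bounds are ≥ 0, so the slice is exact drop/take
def pvShift {T : Type} (items : List T) (off n : Int) (pad : T) : List T :=
  let lead := max 0 off
  let start := max 0 (-off)
  let body := PySem.List.slice items (some start) (some (start + max 0 (n - lead)))
  ((List.replicate (min lead n).toNat pad ++ body ++ List.replicate n.toNat pad).take n.toNat)

-- Source B: rows = [_shift([0 if v == -1 else v for v in row], x, 10, 0)[::-1] for row in screenarray];
--       return _shift(rows, y, 10, [0]*10)   ([::-1] is List.reverse, cf. PySem.List.slice?_none_none_neg_one)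
def createScreenMask_alt (screenarray : List (List Int)) (x : Int) (y : Int) : List (List Int) :=
  let rows := screenarray.map (fun row =>
    (pvShift (row.map (fun v => if v == -1 then 0 else v)) x 10 0).reverse)
  pvShift rows y 10 (List.replicate 10 0)

-- ===== PRECONDITION & SPEC =====
def Spec_createScreenMask (screenarray : List (List Int)) (x : Int) (y : Int) (out : List (List Int)) : Prop := out = createScreenMask_alt screenarray x y
instance (screenarray : List (List Int)) (x : Int) (y : Int) (out : List (List Int)) : Decidable (Spec_createScreenMask screenarray x y out) := by unfold Spec_createScreenMask; infer_instance

-- ===== CLAIM (what is proved, stated in full; the proofs are below) =====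
def Claim_equal_createScreenMask : Prop := ∀ (screenarray : List (List Int)) (x : Int) (y : Int), Dom_createScreenMask screenarray x y → Spec_createScreenMask screenarray x y (createScreenMask screenarray x y)

-- ===== LEMMAS AND PROOFS =====

-- the common target: the value of output cell (ppY, ppX) (x-flip mapping)
def pvGatherCell (sa : List (List Int)) (x y ppY ppX : Int) : Int :=
  let ty := ppY - y
  let tx := (10 - 1 - ppX) - x
  if 0 ≤ ty ∧ ty < (sa.length : Int) then
    let row := sa.getD ty.toNat []
    if 0 ≤ tx ∧ tx < (row.length : Int) then
      let v := row.getD tx.toNat 0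
      if v ≠ -1 then v else 0
    else 0
  else 0

def pvGather (sa : List (List Int)) (x y : Int) : List (List Int) :=
  (PySem.List.pyRange 0 10 1).map (fun ppY =>
    (PySem.List.pyRange 0 10 1).map (fun ppX => pvGatherCell sa x y ppY ppX))

-- ---- A = pvGather ----

-- A's inner-loop body restricted to the single row it touches
def pvRowStep (sa : List (List Int)) (x y sy : Int) (row : List Int) (sx : Int) : List Int :=
  let ppX : Int := 10 - sx - 1
  if ppX ≥ 0 ∧ sy ≥ 0 ∧ ppX < 10 ∧ sy < 10 then
    let tx := sx - x
    let ty := sy - y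
    let setpix : Int :=
      if (sa.length : Int) > ty ∧ ty ≥ 0 then
        (if ((sa.getD ty.toNat []).length : Int) > tx ∧ tx ≥ 0 then (sa.getD ty.toNat []).getD tx.toNat 0
         else -1)
      else -1
    if setpix ≠ -1 then row.set ppX.toNat setpix else row
  else row

-- a conditional write over a cell currently holding 0 is an unconditional write of (v or 0)
lemma ifSetRow (row : List Int) (c : Nat) (v : Int) (h0 : row.getD c 0 = 0) (hc : c < row.length) :
    (if v ≠ -1 then row.set c v else row) = row.set c (if v ≠ -1 then v else 0) := by
  by_cases h : v = -1
  · have h0' : row[c] = 0 := (List.getD_eq_getElem row 0 hc).symm.trans h0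
    rw [if_neg (by simp [h]), if_neg (by simp [h]), ← h0', List.set_getElem_self]
  · simp [h]

-- one scatter step writes exactly the gathered value at column 10-sx-1
lemma rowStep_eq (sa : List (List Int)) (x y sy sx : Int) (hs0 : 0 ≤ sy) (hs1 : sy < 10)
    (hx0 : 0 ≤ sx) (hx1 : sx < 10) (row : List Int) (hlen : row.length = 10)
    (h0 : row.getD (10 - sx - 1).toNat 0 = 0) :
    pvRowStep sa x y sy row sx = row.set (10 - sx - 1).toNat (pvGatherCell sa x y sy (10 - sx - 1)) := by
  have e : (10:Int) - 1 - (10 - sx - 1) - x = sx - x := by ring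
  simp only [pvRowStep, pvGatherCell, e]
  rw [if_pos ⟨by omega, hs0, by omega, hs1⟩]
  have hc : (10 - sx - 1).toNat < row.length := by omega
  rw [ifSetRow _ _ _ h0 hc]
  congr 1
  split_ifs <;> first | rfl | omega

-- A's inner loop on a zeroed row produces the gathered row
lemma rowFold (sa : List (List Int)) (x y sy : Int) (hs0 : 0 ≤ sy) (hs1 : sy < 10) :
    List.foldl (pvRowStep sa x y sy) (List.replicate 10 0) [0,1,2,3,4,5,6,7,8,9]
      = [0,1,2,3,4,5,6,7,8,9].map (fun ppX => pvGatherCell sa x y sy ppX) := by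
  simp only [List.foldl_cons, List.foldl_nil, List.map_cons, List.map_nil]
  rw [rowStep_eq sa x y sy 0 hs0 hs1 (by norm_num) (by norm_num) _ (by simp) (by simp),
      rowStep_eq sa x y sy 1 hs0 hs1 (by norm_num) (by norm_num) _ (by simp) (by simp),
      rowStep_eq sa x y sy 2 hs0 hs1 (by norm_num) (by norm_num) _ (by simp) (by simp),
      rowStep_eq sa x y sy 3 hs0 hs1 (by norm_num) (by norm_num) _ (by simp) (by simp),
      rowStep_eq sa x y sy 4 hs0 hs1 (by norm_num) (by norm_num) _ (by simp) (by simp),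
      rowStep_eq sa x y sy 5 hs0 hs1 (by norm_num) (by norm_num) _ (by simp) (by simp),
      rowStep_eq sa x y sy 6 hs0 hs1 (by norm_num) (by norm_num) _ (by simp) (by simp),
      rowStep_eq sa x y sy 7 hs0 hs1 (by norm_num) (by norm_num) _ (by simp) (by simp),
      rowStep_eq sa x y sy 8 hs0 hs1 (by norm_num) (by norm_num) _ (by simp) (by simp),
      rowStep_eq sa x y sy 9 hs0 hs1 (by norm_num) (by norm_num) _ (by simp) (by simp)]
  rfl

lemma setRowSelf (buf : List (List Int)) (r : Nat) (hr : r < buf.length) :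
    buf.set r (buf.getD r []) = buf := by
  rw [List.getD_eq_getElem _ _ hr, List.set_getElem_self]

-- iteration sy of A's outer loop only rewrites row sy
lemma innerStep_eq (sa : List (List Int)) (x y sy : Int) (buf : List (List Int)) (sx : Int)
    (hr : sy.toNat < buf.length) :
    pvInnerStep sa x y sy buf sx
      = buf.set sy.toNat (pvRowStep sa x y sy (buf.getD sy.toNat []) sx) := by
  simp only [pvInnerStep, pvRowStep, pvSet2]
  split_ifs <;> (try rfl) <;> rw [setRowSelf buf sy.toNat hr]

lemma innerFold (L : List Int) (sa : List (List Int)) (x y sy : Int) (buf : List (List Int))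
    (hr : sy.toNat < buf.length) :
    List.foldl (pvInnerStep sa x y sy) buf L
      = buf.set sy.toNat (List.foldl (pvRowStep sa x y sy) (buf.getD sy.toNat []) L) := by
  induction L generalizing buf with
  | nil => rw [List.foldl_nil, List.foldl_nil, setRowSelf buf sy.toNat hr]
  | cons a L ih =>
      rw [List.foldl_cons, List.foldl_cons, innerStep_eq sa x y sy buf a hr,
        ih _ (by simpa using hr)]
      rw [List.set_set]
      congr 1
      rw [List.getD_eq_getElem _ _ (by simpa using hr), List.getElem_set_self]

lemma a_eq_gather (sa : List (List Int)) (x y : Int) :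
    createScreenMask sa x y = pvGather sa x y := by
  have step : ∀ (buf : List (List Int)) (sy : Int), 0 ≤ sy → sy < 10 → buf.length = 10 →
      buf.getD sy.toNat [] = List.replicate 10 0 →
      List.foldl (pvInnerStep sa x y sy) buf [0,1,2,3,4,5,6,7,8,9]
        = buf.set sy.toNat ([0,1,2,3,4,5,6,7,8,9].map (fun ppX => pvGatherCell sa x y sy ppX)) := by
    intro buf sy h0 h1 hlen hrow
    rw [innerFold _ sa x y sy buf (by omega), hrow, rowFold sa x y sy h0 h1]
  have hr : PySem.List.pyRange 0 10 1 = [0,1,2,3,4,5,6,7,8,9] := by decide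
  unfold createScreenMask pvGather
  rw [hr]
  show List.foldl _ ([[0,0,0,0,0,0,0,0,0,0],[0,0,0,0,0,0,0,0,0,0],[0,0,0,0,0,0,0,0,0,0],[0,0,0,0,0,0,0,0,0,0],[0,0,0,0,0,0,0,0,0,0],[0,0,0,0,0,0,0,0,0,0],[0,0,0,0,0,0,0,0,0,0],[0,0,0,0,0,0,0,0,0,0],[0,0,0,0,0,0,0,0,0,0],[0,0,0,0,0,0,0,0,0,0]]) _ = _
  rw [List.foldl_cons, List.foldl_cons, List.foldl_cons, List.foldl_cons, List.foldl_cons,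
      List.foldl_cons, List.foldl_cons, List.foldl_cons, List.foldl_cons, List.foldl_cons,
      List.foldl_nil]
  rw [step _ 0 (by norm_num) (by norm_num) (by simp) (by simp)]
  rw [step _ 1 (by norm_num) (by norm_num) (by simp) (by simp)]
  rw [step _ 2 (by norm_num) (by norm_num) (by simp) (by simp)]
  rw [step _ 3 (by norm_num) (by norm_num) (by simp) (by simp)]
  rw [step _ 4 (by norm_num) (by norm_num) (by simp) (by simp)]
  rw [step _ 5 (by norm_num) (by norm_num) (by simp) (by simp)]
  rw [step _ 6 (by norm_num) (by norm_num) (by simp) (by simp)]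
  rw [step _ 7 (by norm_num) (by norm_num) (by simp) (by simp)]
  rw [step _ 8 (by norm_num) (by norm_num) (by simp) (by simp)]
  rw [step _ 9 (by norm_num) (by norm_num) (by simp) (by simp)]
  rfl

-- ---- B = pvGather ----

lemma shift_length {T : Type} (items : List T) (off : Int) (pad : T) :
    (pvShift items off 10 pad).length = 10 := by
  simp only [pvShift, List.length_take, List.length_append, List.length_replicate]
  omega

lemma shift_getElem? {T : Type} (items : List T) (off : Int) (pad : T) (k : Nat) (hk : k < 10) :
    (pvShift items off 10 pad)[k]? =
      some (if 0 ≤ (k : Int) - off ∧ (k : Int) - off < (items.length : Int)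
            then items.getD ((k : Int) - off).toNat pad else pad) := by
  simp only [pvShift]
  rw [PySem.List.slice_toNat _ (le_max_left _ _) (by positivity)]
  set a := (min (max 0 off) 10).toNat with ha
  set s := (max 0 (-off)).toNat with hs
  set e := (max 0 (-off) + max 0 (10 - max 0 off)).toNat with he
  clear_value a s e
  rw [List.getElem?_take_of_lt (by omega : k < (10:Int).toNat)]
  by_cases hka : k < a
  · rw [List.getElem?_append_left (by simp only [List.length_append, List.length_replicate,
        List.length_take, List.length_drop]; omega),
        List.getElem?_append_left (by simp only [List.length_replicate]; omega),
        List.getElem?_replicate, if_pos hka, if_neg (by omega)]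
  · by_cases hkb : k - a < (e - s) ⊓ (items.length - s)
    · rw [List.getElem?_append_left (by simp only [List.length_append, List.length_replicate,
          List.length_take, List.length_drop]; omega),
          List.getElem?_append_right (by simp only [List.length_replicate]; omega)]
      simp only [List.length_replicate]
      rw [List.getElem?_take_of_lt (by omega), List.getElem?_drop,
          List.getElem?_eq_getElem (by omega)]
      rw [if_pos (by constructor <;> omega)]
      rw [List.getD_eq_getElem _ _ (by omega)]
      have hidx : ((k : Int) - off).toNat = s + (k - a) := by omega
      simp only [hidx]
    · rw [List.getElem?_append_right (by simp only [List.length_append, List.length_replicate,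
          List.length_take, List.length_drop]; omega)]
      simp only [List.length_append, List.length_replicate, List.length_take, List.length_drop]
      rw [List.getElem?_replicate, if_pos (by omega), if_neg (by omega)]

lemma lit_get (i : Nat) (h : i < 10) :
    (([0,1,2,3,4,5,6,7,8,9] : List Int))[i]? = some (i : Int) := by
  interval_cases i <;> rfl

-- the -1→0 value map commutes with indexing
lemma mapz_getD (row : List Int) (t : Nat) (ht : t < row.length) :
    (row.map (fun v => if v == -1 then 0 else v)).getD t 0
      = (if row.getD t 0 ≠ -1 then row.getD t 0 else 0) := by
  rw [List.getD_eq_getElem _ _ (by simpa using ht), List.getElem_map,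
      List.getD_eq_getElem _ _ ht]
  by_cases hv : row[t] = -1 <;> simp [hv]

-- per-row: horizontal shift + reverse = gathered row (when the source row exists)
lemma row_eq (sa : List (List Int)) (x y ppY : Int)
    (h : 0 ≤ ppY - y ∧ ppY - y < (sa.length : Int)) :
    (pvShift ((sa.getD (ppY - y).toNat []).map (fun v => if v == -1 then 0 else v)) x 10 0).reverse
      = ([0,1,2,3,4,5,6,7,8,9] : List Int).map (fun ppX => pvGatherCell sa x y ppY ppX) := by
  apply List.ext_getElem?
  intro j
  by_cases hj : j < 10
  · rw [List.getElem?_reverse (by rw [shift_length]; omega), shift_length,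
        shift_getElem? _ _ _ _ (by omega), List.getElem?_map, lit_get j hj]
    simp only [Option.map_some]
    have hcast : ((10 - 1 - j : Nat) : Int) = 10 - 1 - (j : Int) := by omega
    simp only [hcast, pvGatherCell]
    rw [if_pos h]
    simp only [List.length_map]
    by_cases hc : 0 ≤ 10 - 1 - (j:Int) - x ∧
        10 - 1 - (j:Int) - x < ((sa.getD (ppY - y).toNat []).length : Int)
    · rw [if_pos hc, if_pos hc, mapz_getD _ _ (by omega)]
    · rw [if_neg hc, if_neg hc]
  · rw [List.getElem?_eq_none (by rw [List.length_reverse, shift_length]; omega),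
        List.getElem?_eq_none (by simp; omega)]

lemma b_eq_gather (sa : List (List Int)) (x y : Int) :
    createScreenMask_alt sa x y = pvGather sa x y := by
  have hr : PySem.List.pyRange 0 10 1 = [0,1,2,3,4,5,6,7,8,9] := by decide
  unfold createScreenMask_alt pvGather
  rw [hr]
  apply List.ext_getElem?
  intro i
  by_cases hi : i < 10
  · rw [shift_getElem? _ _ _ _ hi, List.getElem?_map, lit_get i hi]
    simp only [Option.map_some, List.length_map]
    by_cases hty : 0 ≤ (i:Int) - y ∧ (i:Int) - y < (sa.length : Int)
    · rw [if_pos hty,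
          List.getD_eq_getElem _ _ (by rw [List.length_map]; omega), List.getElem_map]
      have hrow : sa[((i:Int) - y).toNat]'(by omega) = sa.getD ((i:Int) - y).toNat [] :=
        (List.getD_eq_getElem _ _ (by omega)).symm
      rw [hrow, row_eq sa x y (i:Int) hty]
    · rw [if_neg hty]
      have hz : ∀ ppX ∈ ([0,1,2,3,4,5,6,7,8,9] : List Int),
          pvGatherCell sa x y (i:Int) ppX = 0 := by
        intro ppX _
        simp only [pvGatherCell]
        rw [if_neg hty]
      rw [List.map_congr_left hz]
      rfl
  · rw [List.getElem?_eq_none (by rw [shift_length]; omega),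
        List.getElem?_eq_none (by simp; omega)]

-- ===== VERDICT (by name: the statement is the Claim_ definition above) =====
theorem createScreenMask_spec : Claim_equal_createScreenMask := by
  intro sa x y _
  unfold Spec_createScreenMask
  rw [a_eq_gather, b_eq_gather]
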